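-- pv_equiv track=rewrite | github.com/BrianMH/Dev_Learning | mit101/recipes/lab.py | recursive_lowest_cost_helper
-- ===== SOURCE A (Python) =====
-- def recursive_lowest_cost_helper(food_item, aDict, rDict, ignoreSet):
--     '''
--     Recursively calculates the lowest cost method for preparing a certain recipe.
--     This function can return a proper cost for a found minimum or None if the
--     initial food_item passed does not exist (or no composite recipe exists, thereof)
--
--     This function was extended to simultaneously produce the desired min recipe along
--     with the lowest cost using the two helper functions designed.
--     '''
--     # recursive edge cases
--     if food_item in ignoreSet or (food_item not in aDict and
--                                     food_item not in rDict):
--         return None, None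
--     elif food_item in aDict:
--         return aDict[food_item], {food_item: 1}
--
--     minCost = None
--     minRecipe = None
--     for posWays in rDict[food_item]: # list of potential recipes
--         curCost = 0
--         curRecipe = list()
--         for subItem, dup in posWays: # each tuple of (item, count_needed)
--             curItemCost, subRecipe = recursive_lowest_cost_helper(subItem, aDict,
--                                                                   rDict, ignoreSet)
--
--             # edge case for non-present item (reset values)
--             if curItemCost is None:
--                 curCost = minCost
--                 curRecipe = list()
--                 break
--
--             # if it exists then continue creating current min recipe
--             curCost += dup*curItemCost
--             curRecipe.append(scale_recipe(subRecipe, dup))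
--
--         # Overwrite cost if it is lower or simply the first non-None element found
--         if minCost is not None:
--             minRecipe = make_grocery_list(curRecipe) if curCost < minCost else minRecipe
--             minCost = min(minCost, curCost)
--         else:
--             minCost = curCost
--             minRecipe = make_grocery_list(curRecipe)
--
--     return minCost, minRecipe
--
-- def scale_recipe(flat_recipe, n):
--     """
--     Given a dictionary of ingredients mapped to quantities needed, returns a
--     new dictionary with the quantities scaled by n.
--     """
--     return {item:quantity*n for item, quantity in flat_recipe.items()}
--
-- def make_grocery_list(flat_recipes):
--     """
--     Given a list of flat_recipe dictionaries that map food items to quantities,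
--     return a new overall 'grocery list' dictionary that maps each ingredient name
--     to the sum of its quantities across the given flat recipes.
--
--     For example,
--         make_grocery_list([{'milk':1, 'chocolate':1}, {'sugar':1, 'milk':2}])
--     should return:
--         {'milk':3, 'chocolate': 1, 'sugar': 1}
--     """
--     sumDict = dict()
--     for rDict in flat_recipes:
--         for foodItem in rDict.keys():
--             sumDict[foodItem] = sumDict.get(foodItem, 0) + rDict[foodItem]
--
--     return sumDict
-- ===== SOURCE B (Python) =====
-- def recipe_value(way, lookup):
--     """Cost and merged grocery list of one candidate recipe, or None if some
--     ingredient of it is unobtainable."""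
--     total, grocery = 0, {}
--     for sub, dup in way:
--         value = lookup(sub)
--         if value is None:
--             return None
--         cost, ingredients = value
--         total += dup * cost
--         for name, qty in ingredients.items():
--             grocery[name] = grocery.get(name, 0) + qty * dup
--     return total, grocery
--
--
-- def best_value(ways, lookup):
--     """Cheapest achievable candidate recipe (first one on ties), or None."""
--     best = None
--     for way in ways:
--         cand = recipe_value(way, lookup)
--         if cand is not None and (best is None or cand[0] < best[0]):
--             best = cand
--     return best
--
--
-- def recursive_lowest_cost_helper(food_item, aDict, rDict, ignoreSet):
--     """Bottom-up value iteration instead of top-down recursion: a table of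
--     per-recipe-key optimal (cost, grocery list) values is rebuilt from the
--     previous table until it stops changing; len(rDict)+1 rounds always suffice,
--     since every acyclic dependency chain visits a recipe key at most once."""
--     def lookup_in(table):
--         def lookup(item):
--             if item in ignoreSet:
--                 return None
--             if item in aDict:
--                 return aDict[item], {item: 1}
--             return table.get(item)
--         return lookup
--
--     table = {}
--     for _ in range(len(rDict) + 1):
--         new = {k: best_value(ways, lookup_in(table)) for k, ways in rDict.items()}
--         if new == table:
--             break
--         table = new
--     value = lookup_in(table)(food_item)
--     return value if value is not None else (None, None)
-- ===== Notes on version B (the rewrite author's own statement) =====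
-- stated objective: alternative
-- what changed: Replaces the naive top-down recursion (which re-solves a sub-item once per path through the recipe graph) by bottom-up value iteration: a table of per-recipe-key optimal (cost, grocery-list) values is rebuilt from the previous round's table until it stops changing (at most len(rDict)+1 rounds) and the answer read off it, with the candidate-recipe evaluation merging one grocery dict inline instead of collecting scaled sub-recipes and merging at the end; …
-- intended difference: On a composite item that has candidate recipes but none achievable, A returns (None, {}) — an accident of its reset-and-break bookkeeping — while B returns (None, None), the marker every other unobtainable branch of A itself uses. — e.g. on recursive_lowest_cost_helper("a", [], [("a", [[("b", 1)]])], []): A returns (none, some []), B returns (none, none)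
-- outside the precondition, e.g. on recursive_lowest_cost_helper('x', {}, {'a': [[('a', 1)]]}, set()): A returns (None, None), B returns (None, None)
import Mathlib
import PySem

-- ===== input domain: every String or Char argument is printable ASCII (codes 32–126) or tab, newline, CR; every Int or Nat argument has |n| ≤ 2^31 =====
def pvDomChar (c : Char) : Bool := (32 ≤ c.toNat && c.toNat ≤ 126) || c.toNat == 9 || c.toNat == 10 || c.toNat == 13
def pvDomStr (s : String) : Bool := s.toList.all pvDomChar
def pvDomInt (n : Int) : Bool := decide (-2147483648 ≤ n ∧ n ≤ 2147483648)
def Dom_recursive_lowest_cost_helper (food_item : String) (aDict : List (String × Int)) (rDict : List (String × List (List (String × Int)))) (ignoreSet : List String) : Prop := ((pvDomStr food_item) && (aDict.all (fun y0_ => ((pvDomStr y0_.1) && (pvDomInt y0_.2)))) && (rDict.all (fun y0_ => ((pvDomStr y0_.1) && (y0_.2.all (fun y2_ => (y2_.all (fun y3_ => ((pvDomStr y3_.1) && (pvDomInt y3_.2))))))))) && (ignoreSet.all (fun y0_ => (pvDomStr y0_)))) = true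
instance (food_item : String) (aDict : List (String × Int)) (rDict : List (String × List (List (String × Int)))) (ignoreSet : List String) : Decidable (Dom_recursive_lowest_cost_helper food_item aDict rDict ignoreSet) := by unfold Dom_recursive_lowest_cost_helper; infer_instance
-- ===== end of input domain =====

-- B replaces A's top-down naive recursion over the recipe graph by bottom-up value
-- iteration (a per-recipe-key table of optimal values rebuilt round by round);
-- objective: alternative algorithm, not claimed faster; B intentionally returns
-- (none, none) instead of A's accidental (none, some []) on unachievable composites (see D_).

-- ===== PORT A =====
-- scale_recipe(flat_recipe, n): dict comprehension over items (our recipe dicts have unique keys)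
def pvScaleRecipe (flat : List (String × Int)) (n : Int) : List (String × Int) :=
  flat.map (fun kv => (kv.1, kv.2 * n))

-- make_grocery_list: sumDict[k] = sumDict.get(k, 0) + r[k] over each r's keys
-- (the flat recipes A builds have unique keys, so iterating items = iterating keys)
def pvMakeGroceryList (rs : List (List (String × Int))) : List (String × Int) :=
  (rs.foldl (fun d r => r.foldl (fun d kv => PySem.Dict.modify d kv.1 0 (· + kv.2)) d)
    PySem.Dict.empty).items

-- the inner 'for subItem, dup in posWays' loop with its early break on a failed sub-item
def pvInnerA (rec : String → Option Int × Option (List (String × Int))) (minCost : Option Int) :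
    List (String × Int) → Int → List (List (String × Int)) →
      Option Int × List (List (String × Int))
  | [], cc, cr => (some cc, cr)
  | (s, dup) :: rest, cc, cr =>
    match rec s with
    | (none, _) => (minCost, [])   -- curCost = minCost; curRecipe = []; break
    | (some c, r?) => pvInnerA rec minCost rest (cc + dup * c) (cr ++ [pvScaleRecipe (r?.getD []) dup])

-- the outer 'for posWays in rDict[food_item]' loop
def pvOuterA (rec : String → Option Int × Option (List (String × Int))) :
    List (List (String × Int)) → Option Int → Option (List (String × Int)) →
      Option Int × Option (List (String × Int))
  | [], mc, mr => (mc, mr)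
  | pw :: rest, mc, mr =>
    match pvInnerA rec mc pw 0 [] with
    | (cc?, cr) =>
      match mc with
      | some m =>
        -- on the failure path pvInnerA returned minCost = some m, so cc? is some here
        let cc := cc?.getD 0
        pvOuterA rec rest (some (min m cc)) (if cc < m then some (pvMakeGroceryList cr) else mr)
      | none => pvOuterA rec rest cc? (some (pvMakeGroceryList cr))

-- the recursion itself; fuel is only a totality device: one unit is spent per expansion of a
-- composite (recipe-only) item, and on acyclic inputs (Pre_) a chain of expansions visits
-- distinct rDict keys, so the initial fuel rDict.length + 1 never runs out
def pvRlchA (aD : List (String × Int)) (rD : List (String × List (List (String × Int))))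
    (ign : List String) : Nat → String → Option Int × Option (List (String × Int))
  | fuel, k =>
    if k ∈ ign ∨ ((List.lookup k aD).isNone ∧ (List.lookup k rD).isNone) then (none, none)
    else
      match List.lookup k aD with
      | some c => (some c, some [(k, 1)])
      | none =>
        match fuel with
        | 0 => (none, none)   -- unreachable on inputs satisfying Pre_
        | f + 1 => pvOuterA (pvRlchA aD rD ign f) ((List.lookup k rD).getD []) none none

def recursive_lowest_cost_helper (food_item : String) (aDict : List (String × Int)) (rDict : List (String × List (List (String × Int)))) (ignoreSet : List String) : Option Int × (Option (List (String × Int))) :=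
  pvRlchA aDict rDict ignoreSet (rDict.length + 1) food_item

-- ===== PORT B =====
-- lookup_in(table): ignored items and base ingredients directly, anything else from the table
def pvLkB (aD : List (String × Int)) (ign : List String)
    (table : List (String × Option (Int × List (String × Int)))) (s : String) :
    Option (Int × List (String × Int)) :=
  if s ∈ ign then none
  else
    match List.lookup s aD with
    | some c => some (c, [(s, 1)])
    | none => (List.lookup s table).getD none

-- recipe_value(way, lookup): running total plus one grocery dict merged as it goes
def pvWayB (lk : String → Option (Int × List (String × Int))) :
    List (String × Int) → Int → PySem.Dict String Int → Option (Int × List (String × Int))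
  | [], tot, g => some (tot, g.items)
  | (s, dup) :: rest, tot, g =>
    match lk s with
    | none => none
    | some (c, ing) =>
      pvWayB lk rest (tot + dup * c)
        (ing.foldl (fun d kv => PySem.Dict.modify d kv.1 0 (· + kv.2 * dup)) g)

-- best_value(ways, lookup): cheapest achievable candidate, first one on ties
def pvBestB (lk : String → Option (Int × List (String × Int))) :
    List (List (String × Int)) → Option (Int × List (String × Int)) →
      Option (Int × List (String × Int))
  | [], best => best
  | w :: rest, best =>
    match pvWayB lk w 0 PySem.Dict.empty, best with
    | none, _ => pvBestB lk rest best
    | some cand, none => pvBestB lk rest (some cand)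
    | some cand, some b => pvBestB lk rest (if cand.1 < b.1 then some cand else some b)

-- 'for k, ways in rDict.items()': the dict's keys, i.e. first occurrences
def pvKeysB (rD : List (String × List (List (String × Int)))) : List String :=
  PySem.Set.ofList (rD.map Prod.fst)

-- new = {k: best_value(ways, lookup_in(table)) for k, ways in rDict.items()}, repeated,
-- stopping once the table no longer changes
def pvTblB (aD : List (String × Int)) (rD : List (String × List (List (String × Int))))
    (ign : List String) : Nat → List (String × Option (Int × List (String × Int)))
  | 0 => []
  | i + 1 =>
    let prev := pvTblB aD rD ign i
    let new := (pvKeysB rD).map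
      (fun k => (k, pvBestB (pvLkB aD ign prev) ((List.lookup k rD).getD []) none))
    if new = prev then prev else new

def recursive_lowest_cost_helper_alt (food_item : String) (aDict : List (String × Int)) (rDict : List (String × List (List (String × Int)))) (ignoreSet : List String) : Option Int × (Option (List (String × Int))) :=
  match pvLkB aDict ignoreSet (pvTblB aDict rDict ignoreSet (rDict.length + 1)) food_item with
  | some (c, g) => (some c, some g)
  | none => (none, none)

-- ===== PRECONDITION & SPEC =====
-- successors of an item in the expansion graph: its recipes' ingredients, but only if A
-- would actually expand it (not ignored, not a base ingredient)
def pvSuccs (aD : List (String × Int)) (rD : List (String × List (List (String × Int))))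
    (ign : List String) (k : String) : List String :=
  if k ∈ ign ∨ (List.lookup k aD).isSome then []
  else ((List.lookup k rD).getD []).flatMap (fun w => w.map Prod.fst)

def pvStepR (aD : List (String × Int)) (rD : List (String × List (List (String × Int))))
    (ign : List String) (S : List String) : List String :=
  S ++ S.flatMap (pvSuccs aD rD ign)

-- Pre_ excludes inputs whose expansion graph has a cycle through a recipe key: there the
-- Python A can recurse forever (RecursionError). This is a slight over-approximation: a
-- cyclic input whose cycle A never visits (unreachable from food_item, or cut off by the
-- early break on a failing ingredient) is excluded too although A returns there (see cites).
def Pre_recursive_lowest_cost_helper (food_item : String) (aDict : List (String × Int)) (rDict : List (String × List (List (String × Int)))) (ignoreSet : List String) : Prop :=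
  ∀ k ∈ rDict.map Prod.fst,
    k ∉ (pvStepR aDict rDict ignoreSet)^[rDict.length] (pvSuccs aDict rDict ignoreSet k)
instance (food_item : String) (aDict : List (String × Int)) (rDict : List (String × List (List (String × Int)))) (ignoreSet : List String) : Decidable (Pre_recursive_lowest_cost_helper food_item aDict rDict ignoreSet) := by unfold Pre_recursive_lowest_cost_helper; infer_instance

def pvWitness_recursive_lowest_cost_helper : String × (List (String × Int)) × (List (String × List (List (String × Int)))) × List String :=
  ("cake", [("flour", 2), ("sugar", 3)], [("cake", [[("flour", 3), ("sugar", 1)], [("sugar", 5)]])], ["salt"])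

-- obtainability: an item is achievable iff it is a non-ignored base ingredient, or a
-- non-ignored recipe key one of whose recipes has only achievable ingredients (bounded
-- fixpoint; on acyclic inputs rDict.length + 1 rounds reach it)
def pvObt (aD : List (String × Int)) (rD : List (String × List (List (String × Int))))
    (ign : List String) : Nat → String → Bool
  | f, k =>
    if k ∈ ign then false
    else if (List.lookup k aD).isSome then true
    else
      match f with
      | 0 => false
      | f + 1 => ((List.lookup k rD).getD []).any (fun sd => sd.all (fun sd' => pvObt aD rD ign f sd'.1))

-- On a composite item that has candidate recipes but none achievable, A returns
-- (None, {}) — an accident of its reset-and-break bookkeeping (curCost = minCost;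
-- curRecipe = []) — while B returns (None, None), the marker every other
-- unobtainable branch of A itself uses; (None, None) is the intended value.
def D_recursive_lowest_cost_helper (food_item : String) (aDict : List (String × Int)) (rDict : List (String × List (List (String × Int)))) (ignoreSet : List String) : Prop :=
  food_item ∉ ignoreSet ∧ List.lookup food_item aDict = none ∧
  (List.lookup food_item rDict).getD [] ≠ [] ∧
  pvObt aDict rDict ignoreSet (rDict.length + 1) food_item = false
instance (food_item : String) (aDict : List (String × Int)) (rDict : List (String × List (List (String × Int)))) (ignoreSet : List String) : Decidable (D_recursive_lowest_cost_helper food_item aDict rDict ignoreSet) := by unfold D_recursive_lowest_cost_helper; infer_instance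

def Spec_recursive_lowest_cost_helper (food_item : String) (aDict : List (String × Int)) (rDict : List (String × List (List (String × Int)))) (ignoreSet : List String) (out : Option Int × (Option (List (String × Int)))) : Prop := ¬ D_recursive_lowest_cost_helper food_item aDict rDict ignoreSet → out = recursive_lowest_cost_helper_alt food_item aDict rDict ignoreSet
instance (food_item : String) (aDict : List (String × Int)) (rDict : List (String × List (List (String × Int)))) (ignoreSet : List String) (out : Option Int × (Option (List (String × Int)))) : Decidable (Spec_recursive_lowest_cost_helper food_item aDict rDict ignoreSet out) := by unfold Spec_recursive_lowest_cost_helper; infer_instance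

def pvDiffWitness_recursive_lowest_cost_helper : String × (List (String × Int)) × (List (String × List (List (String × Int)))) × List String :=
  ("a", [], [("a", [[("b", 1)]])], [])
def pvDiffWitnessOut_recursive_lowest_cost_helper : (Option Int × (Option (List (String × Int)))) × (Option Int × (Option (List (String × Int)))) :=
  ((none, some []), (none, none))

-- ===== CLAIM (what is proved, stated in full; the proofs are below) =====
def Claim_unchanged_recursive_lowest_cost_helper : Prop := ∀ (food_item : String) (aDict : List (String × Int)) (rDict : List (String × List (List (String × Int)))) (ignoreSet : List String), Dom_recursive_lowest_cost_helper food_item aDict rDict ignoreSet → Pre_recursive_lowest_cost_helper food_item aDict rDict ignoreSet → Spec_recursive_lowest_cost_helper food_item aDict rDict ignoreSet (recursive_lowest_cost_helper food_item aDict rDict ignoreSet)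
def Claim_changed_recursive_lowest_cost_helper : Prop := Dom_recursive_lowest_cost_helper (pvDiffWitness_recursive_lowest_cost_helper.1) (pvDiffWitness_recursive_lowest_cost_helper.2.1) (pvDiffWitness_recursive_lowest_cost_helper.2.2.1) (pvDiffWitness_recursive_lowest_cost_helper.2.2.2) ∧ Pre_recursive_lowest_cost_helper (pvDiffWitness_recursive_lowest_cost_helper.1) (pvDiffWitness_recursive_lowest_cost_helper.2.1) (pvDiffWitness_recursive_lowest_cost_helper.2.2.1) (pvDiffWitness_recursive_lowest_cost_helper.2.2.2) ∧ D_recursive_lowest_cost_helper (pvDiffWitness_recursive_lowest_cost_helper.1) (pvDiffWitness_recursive_lowest_cost_helper.2.1) (pvDiffWitness_recursive_lowest_cost_helper.2.2.1) (pvDiffWitness_recursive_lowest_cost_helper.2.2.2) ∧ recursive_lowest_cost_helper (pvDiffWitness_recursive_lowest_cost_helper.1) (pvDiffWitness_recursive_lowest_cost_helper.2.1) (pvDiffWitness_recursive_lowest_cost_helper.2.2.1) (pvDiffWitness_recursive_lowest_cost_helper.2.2.2) = pvDiffWitnessOut_recursive_lowest_cost_helper.1 ∧ recursive_lowest_cost_helper_alt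 (pvDiffWitness_recursive_lowest_cost_helper.1) (pvDiffWitness_recursive_lowest_cost_helper.2.1) (pvDiffWitness_recursive_lowest_cost_helper.2.2.1) (pvDiffWitness_recursive_lowest_cost_helper.2.2.2) = pvDiffWitnessOut_recursive_lowest_cost_helper.2 ∧ pvDiffWitnessOut_recursive_lowest_cost_helper.1 ≠ pvDiffWitnessOut_recursive_lowest_cost_helper.2
def Claim_exact_recursive_lowest_cost_helper : Prop := ∀ (food_item : String) (aDict : List (String × Int)) (rDict : List (String × List (List (String × Int)))) (ignoreSet : List String), Dom_recursive_lowest_cost_helper food_item aDict rDict ignoreSet → Pre_recursive_lowest_cost_helper food_item aDict rDict ignoreSet → D_recursive_lowest_cost_helper food_item aDict rDict ignoreSet → recursive_lowest_cost_helper food_item aDict rDict ignoreSet ≠ recursive_lowest_cost_helper_alt food_item aDict rDict ignoreSet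

-- ===== LEMMAS AND PROOFS =====

-- the relation the round-by-round induction maintains between A's recursion at fuel i and
-- B's lookup through round-i's table: B some (c, g) forces A = (some c, some g);
-- B none forces A's cost to be none
def pvRelV (v : Option Int × Option (List (String × Int)))
    (w : Option (Int × List (String × Int))) : Prop :=
  match w with
  | some cg => v = (some cg.1, some cg.2)
  | none => v.1 = none

-- A's merge of a list of already-scaled parts, as a Dict (pvMakeGroceryList = .items of it)
def pvMergeA (rs : List (List (String × Int))) : PySem.Dict String Int :=
  rs.foldl (fun d r => r.foldl (fun d kv => PySem.Dict.modify d kv.1 0 (· + kv.2)) d)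
    PySem.Dict.empty

lemma pv_lookup_map_self (g : String → Option (Int × List (String × Int))) :
    ∀ (ks : List String) (s : String), s ∈ ks →
      List.lookup s (ks.map (fun k => (k, g k))) = some (g s) := by
  intro ks
  induction ks with
  | nil => intro s hs; cases hs
  | cons k ks ih =>
    intro s hs
    rw [List.map_cons, List.lookup]
    by_cases h : s = k
    · subst h; simp
    · rw [show (s == k) = false from beq_eq_false_iff_ne.mpr h]
      exact ih s ((List.mem_cons.mp hs).resolve_left h)

lemma pv_lookup_map_none (g : String → Option (Int × List (String × Int))) :
    ∀ (ks : List String) (s : String), s ∉ ks →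
      List.lookup s (ks.map (fun k => (k, g k))) = none := by
  intro ks
  induction ks with
  | nil => intro s _; rfl
  | cons k ks ih =>
    intro s hs
    rw [List.map_cons, List.lookup]
    rw [show (s == k) = false from beq_eq_false_iff_ne.mpr (fun h => hs (h ▸ List.mem_cons_self))]
    exact ih s (fun h => hs (List.mem_cons_of_mem _ h))

-- whether B stopped at the fixpoint or not, round i+1's table is round i's image
lemma pv_tbl_succ (aD : List (String × Int)) (rD : List (String × List (List (String × Int))))
    (ign : List String) (i : Nat) :
    pvTblB aD rD ign (i + 1) =
      (pvKeysB rD).map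
        (fun k => (k, pvBestB (pvLkB aD ign (pvTblB aD rD ign i)) ((List.lookup k rD).getD []) none)) := by
  rw [pvTblB]
  split_ifs with h
  · exact h.symm
  · rfl

lemma pv_lookup_none_not_mem_keys (rD : List (String × List (List (String × Int)))) (k : String)
    (h : List.lookup k rD = none) : k ∉ rD.map Prod.fst := by
  induction rD with
  | nil => simp
  | cons p rest ih =>
    rw [List.lookup] at h
    by_cases he : k = p.1
    · rw [show (k == p.1) = true from beq_iff_eq.mpr he] at h; cases h
    · rw [show (k == p.1) = false from beq_eq_false_iff_ne.mpr he] at h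
      simpa [he] using ih h

lemma pv_lookup_some_mem_keys (rD : List (String × List (List (String × Int)))) (k : String)
    (h : (List.lookup k rD).isSome) : k ∈ rD.map Prod.fst := by
  induction rD with
  | nil => simp [List.lookup] at h
  | cons p rest ih =>
    rw [List.lookup] at h
    by_cases he : k = p.1
    · simp [he]
    · rw [show (k == p.1) = false from beq_eq_false_iff_ne.mpr he] at h
      simpa [he] using ih h

-- A's inner loop vs B's recipe_value: with B's grocery dict equal to the merge of A's
-- accumulated parts, either both fail (A breaking to (minCost, [])) or both succeed with
-- the same total and B's dict = the merge of A's final parts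
lemma pv_way_eq (rec : String → Option Int × Option (List (String × Int)))
    (lk : String → Option (Int × List (String × Int)))
    (H : ∀ s, pvRelV (rec s) (lk s)) (mc : Option Int) :
    ∀ (way : List (String × Int)) (cc : Int) (cr : List (List (String × Int)))
      (g : PySem.Dict String Int), g = pvMergeA cr →
      match pvWayB lk way cc g with
      | none => pvInnerA rec mc way cc cr = (mc, [])
      | some tg => ∃ crF, pvInnerA rec mc way cc cr = (some tg.1, crF) ∧
          tg.2 = pvMakeGroceryList crF := by
  intro way
  induction way with
  | nil =>
    intro cc cr g hg
    simp only [pvWayB, pvInnerA]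
    exact ⟨cr, rfl, by rw [hg]; rfl⟩
  | cons hd rest ih =>
    intro cc cr g hg
    obtain ⟨s, dup⟩ := hd
    have hs := H s
    simp only [pvWayB, pvInnerA]
    cases hlk : lk s with
    | none =>
      simp only [pvRelV, hlk] at hs
      cases hrec : rec s with
      | mk c? r? => rw [hrec] at hs; simp at hs; rw [hs]
    | some cg =>
      obtain ⟨c, ing⟩ := cg
      simp only [pvRelV, hlk] at hs
      rw [hs]
      have hg' : ing.foldl (fun d kv => PySem.Dict.modify d kv.1 0 (· + kv.2 * dup)) g =
          pvMergeA (cr ++ [pvScaleRecipe ((some ing).getD []) dup]) := by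
        rw [pvMergeA, List.foldl_append, ← pvMergeA, ← hg]
        simp only [List.foldl_cons, List.foldl_nil, Option.getD_some, pvScaleRecipe,
          List.foldl_map]
      simpa using ih (cc + dup * c) (cr ++ [pvScaleRecipe ((some ing).getD []) dup]) _ hg'

-- A's outer loop vs B's best_value: the running minimum (mc, mr) corresponds to best
lemma pv_best_eq (rec : String → Option Int × Option (List (String × Int)))
    (lk : String → Option (Int × List (String × Int)))
    (H : ∀ s, pvRelV (rec s) (lk s)) :
    ∀ (ways : List (List (String × Int))) (mc : Option Int)
      (mr : Option (List (String × Int))) (best : Option (Int × List (String × Int))),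
      ((mc = none ∧ best = none) ∨
        (∃ c g, mc = some c ∧ mr = some g ∧ best = some (c, g))) →
      pvRelV (pvOuterA rec ways mc mr) (pvBestB lk ways best) := by
  intro ways
  induction ways with
  | nil =>
    intro mc mr best hinv
    simp only [pvOuterA, pvBestB]
    rcases hinv with ⟨hmc, hb⟩ | ⟨c, g, hmc, hmr, hb⟩
    · rw [hmc, hb]; rfl
    · rw [hmc, hmr, hb]; rfl
  | cons w rest ih =>
    intro mc mr best hinv
    have h8 := pv_way_eq rec lk H mc w 0 [] PySem.Dict.empty rfl
    simp only [pvOuterA, pvBestB]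
    cases hW : pvWayB lk w 0 PySem.Dict.empty with
    | none =>
      rw [hW] at h8
      rw [h8]
      rcases hinv with ⟨hmc, hb⟩ | ⟨c, g, hmc, hmr, hb⟩
      · rw [hmc, hb]
        exact ih none (some (pvMakeGroceryList [])) none (Or.inl ⟨rfl, rfl⟩)
      · rw [hmc, hmr, hb]
        simp only [Option.getD_some, min_self, lt_irrefl]
        exact ih (some c) (some g) (some (c, g)) (Or.inr ⟨c, g, rfl, rfl, rfl⟩)
    | some tg =>
      rw [hW] at h8
      obtain ⟨crF, hI, hmk⟩ := h8
      rw [hI]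
      obtain ⟨t, gl⟩ := tg
      rcases hinv with ⟨hmc, hb⟩ | ⟨c, g, hmc, hmr, hb⟩
      · rw [hmc, hb]
        exact ih (some t) (some (pvMakeGroceryList crF)) (some (t, gl))
          (Or.inr ⟨t, pvMakeGroceryList crF, rfl, rfl, congrArg (fun x => some (t, x)) hmk⟩)
      · rw [hmc, hmr, hb]
        simp only [Option.getD_some]
        by_cases hlt : t < c
        · rw [min_eq_right (le_of_lt hlt), if_pos hlt, if_pos hlt]
          exact ih (some t) (some (pvMakeGroceryList crF)) (some (t, gl))
            (Or.inr ⟨t, pvMakeGroceryList crF, rfl, rfl, congrArg (fun x => some (t, x)) hmk⟩)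
        · rw [min_eq_left (by omega), if_neg hlt, if_neg hlt]
          exact ih (some c) (some g) (some (c, g)) (Or.inr ⟨c, g, rfl, rfl, rfl⟩)

-- the main round-by-round correspondence: A at fuel i vs B's lookup through round-i's table
lemma pv_rel (aD : List (String × Int)) (rD : List (String × List (List (String × Int))))
    (ign : List String) :
    ∀ (i : Nat) (k : String),
      pvRelV (pvRlchA aD rD ign i k) (pvLkB aD ign (pvTblB aD rD ign i) k) := by
  intro i
  induction i with
  | zero =>
    intro k
    rw [pvRlchA, pvLkB]
    by_cases hig : k ∈ ign
    · rw [if_pos hig, if_pos (Or.inl hig)]; rfl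
    · rw [if_neg hig]
      cases ha : List.lookup k aD with
      | some c =>
        rw [if_neg (by simp [hig])]
        simp only [pvRelV]
      | none =>
        simp only [pvTblB, List.lookup, Option.getD_none, pvRelV]
        split_ifs <;> rfl
  | succ i ih =>
    intro k
    rw [pvRlchA, pvLkB]
    by_cases hig : k ∈ ign
    · rw [if_pos hig, if_pos (Or.inl hig)]; rfl
    · rw [if_neg hig]
      cases ha : List.lookup k aD with
      | some c =>
        rw [if_neg (by simp [hig])]
        simp only [pvRelV]
      | none =>
        cases hr : List.lookup k rD with
        | none =>
          rw [if_pos (Or.inr ⟨by simp, by simp⟩)]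
          rw [pv_tbl_succ, pv_lookup_map_none
            (fun k => pvBestB (pvLkB aD ign (pvTblB aD rD ign i)) ((List.lookup k rD).getD []) none)
            (pvKeysB rD) k
            (fun hm => pv_lookup_none_not_mem_keys rD k hr
              ((PySem.Set.mem_ofList _ _).mp hm))]
          rfl
        | some ways =>
          rw [if_neg (by simp [hig])]
          have hmem : k ∈ pvKeysB rD := by
            rw [pvKeysB, PySem.Set.mem_ofList]
            exact pv_lookup_some_mem_keys rD k (by simp [hr])
          rw [pv_tbl_succ, pv_lookup_map_self
            (fun k => pvBestB (pvLkB aD ign (pvTblB aD rD ign i)) ((List.lookup k rD).getD []) none)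
            (pvKeysB rD) k hmem]
          simp only [hr, Option.getD_some]
          exact pv_best_eq _ _ ih ways none none none (Or.inl ⟨rfl, rfl⟩)

-- the cost of A's inner loop is some iff every sub-item's cost is some (or it started some)
lemma pv_inner_isSome (rec : String → Option Int × Option (List (String × Int)))
    (mc : Option Int) :
    ∀ (way : List (String × Int)) (cc : Int) (cr : List (List (String × Int))),
      (pvInnerA rec mc way cc cr).1.isSome =
        (way.all (fun sd => (rec sd.1).1.isSome) || mc.isSome) := by
  intro way
  induction way with
  | nil => intro cc cr; simp [pvInnerA]
  | cons hd rest ih =>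
    intro cc cr
    obtain ⟨s, dup⟩ := hd
    simp only [pvInnerA, List.all_cons]
    cases hrec : rec s with
    | mk c? r? =>
      cases c? with
      | none => simp [hrec]
      | some c => simp [hrec, ih]

-- the cost of A's outer loop is some iff some candidate recipe succeeds (or it started some)
lemma pv_outer_isSome (rec : String → Option Int × Option (List (String × Int))) :
    ∀ (ways : List (List (String × Int))) (mc : Option Int) (mr : Option (List (String × Int))),
      (pvOuterA rec ways mc mr).1.isSome =
        (mc.isSome || ways.any (fun w => w.all (fun sd => (rec sd.1).1.isSome))) := by
  intro ways
  induction ways with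
  | nil => intro mc mr; simp [pvOuterA]
  | cons w rest ih =>
    intro mc mr
    simp only [pvOuterA, List.any_cons]
    cases hI : pvInnerA rec mc w 0 [] with
    | mk cc? cr =>
      have hc : cc?.isSome = (w.all (fun sd => (rec sd.1).1.isSome) || mc.isSome) := by
        have := pv_inner_isSome rec mc w 0 []
        rw [hI] at this; exact this
      cases mc with
      | some m => simp [ih]
      | none =>
        rw [ih, hc]
        cases (w.all fun sd => (rec sd.1).1.isSome) <;> simp

-- A's cost-someness coincides with the obtainability fixpoint at every fuel
lemma pv_obt_eq (aD : List (String × Int)) (rD : List (String × List (List (String × Int))))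
    (ign : List String) :
    ∀ (i : Nat) (k : String), (pvRlchA aD rD ign i k).1.isSome = pvObt aD rD ign i k := by
  intro i
  induction i with
  | zero =>
    intro k
    rw [pvRlchA, pvObt]
    by_cases hig : k ∈ ign
    · rw [if_pos (Or.inl hig), if_pos hig]; rfl
    · rw [if_neg hig]
      cases ha : List.lookup k aD with
      | some c => rw [if_neg (by simp [hig, ha])]; simp [ha]
      | none =>
        simp only [ha, Option.isSome_none, Bool.false_eq_true, if_false]
        split_ifs <;> rfl
  | succ i ih =>
    intro k
    rw [pvRlchA, pvObt]
    by_cases hig : k ∈ ign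
    · rw [if_pos (Or.inl hig), if_pos hig]; rfl
    · rw [if_neg hig]
      cases ha : List.lookup k aD with
      | some c => rw [if_neg (by simp [hig, ha])]; simp [ha]
      | none =>
        simp only [ha, Option.isSome_none, Bool.false_eq_true, if_false]
        by_cases hr : (List.lookup k rD).isNone
        · rw [if_pos (Or.inr ⟨by simp [ha], hr⟩)]
          cases hrr : List.lookup k rD with
          | some ways => rw [hrr] at hr; cases hr
          | none => simp [hrr]
        · rw [if_neg (show ¬(k ∈ ign ∨ (none : Option Int).isNone = true ∧ (List.lookup k rD).isNone = true) by
            rintro (h1 | ⟨_, h2⟩)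
            · exact hig h1
            · exact hr h2)]
          rw [pv_outer_isSome]
          simp only [Option.isSome_none, Bool.false_or]
          congr 1
          funext w
          congr 1
          funext sd
          exact ih sd.1

-- a candidate recipe containing a failing sub-item makes A's inner loop break
lemma pv_inner_fail (rec : String → Option Int × Option (List (String × Int)))
    (mc : Option Int) :
    ∀ (way : List (String × Int)), (∃ sd ∈ way, (rec sd.1).1 = none) →
      ∀ (cc : Int) (cr : List (List (String × Int))),
        pvInnerA rec mc way cc cr = (mc, []) := by
  intro way
  induction way with
  | nil => rintro ⟨sd, h, _⟩; cases h
  | cons hd rest ih =>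
    rintro ⟨sd, hmem, hfail⟩ cc cr
    obtain ⟨s, dup⟩ := hd
    simp only [pvInnerA]
    cases hrec : rec s with
    | mk c? r? =>
      cases c? with
      | none => rfl
      | some c =>
        rcases List.mem_cons.mp hmem with heq | hmem'
        · rw [heq] at hfail; rw [hrec] at hfail; cases hfail
        · exact ih ⟨sd, hmem', hfail⟩ _ _

-- when every candidate recipe fails, A's outer loop over a nonempty list of candidates
-- ends with cost none and the accidental empty grocery list
lemma pv_outer_all_fail (rec : String → Option Int × Option (List (String × Int))) :
    ∀ (ways : List (List (String × Int))),
      (∀ w ∈ ways, ∃ sd ∈ w, (rec sd.1).1 = none) → ways ≠ [] →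
      ∀ (mr : Option (List (String × Int))),
        pvOuterA rec ways none mr = (none, some []) := by
  intro ways
  induction ways with
  | nil => intro _ hne; exact absurd rfl hne
  | cons w rest ih =>
    intro hfail _ mr
    simp only [pvOuterA]
    rw [pv_inner_fail rec none w (hfail w List.mem_cons_self) 0 []]
    cases rest with
    | nil => simp [pvOuterA, pvMakeGroceryList, PySem.Dict.empty]
    | cons r rs =>
      simpa using ih (fun w' hw' => hfail w' (List.mem_cons_of_mem _ hw'))
        (List.cons_ne_nil r rs) (some (pvMakeGroceryList []))

-- under D_, A returns (none, some []) and B returns (none, none)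
lemma pv_values_in_D (food_item : String) (aDict : List (String × Int))
    (rDict : List (String × List (List (String × Int)))) (ignoreSet : List String)
    (hD : D_recursive_lowest_cost_helper food_item aDict rDict ignoreSet) :
    recursive_lowest_cost_helper food_item aDict rDict ignoreSet = (none, some []) ∧
      recursive_lowest_cost_helper_alt food_item aDict rDict ignoreSet = (none, none) := by
  obtain ⟨hig, ha, hwne, hobt⟩ := hD
  -- extract per-way failure from the obtainability fixpoint
  rw [pvObt, if_neg hig, if_neg (by simp [ha])] at hobt
  have hfail : ∀ w ∈ (List.lookup food_item rDict).getD [],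
      ∃ sd ∈ w, (pvRlchA aDict rDict ignoreSet rDict.length sd.1).1 = none := by
    intro w hw
    by_contra hcon
    push_neg at hcon
    have hall : (w.all fun sd' => pvObt aDict rDict ignoreSet rDict.length sd'.1) = true := by
      rw [List.all_eq_true]
      intro sd hsd
      rw [← pv_obt_eq aDict rDict ignoreSet rDict.length sd.1]
      cases hcase : (pvRlchA aDict rDict ignoreSet rDict.length sd.1).1 with
      | none => exact absurd hcase (hcon sd hsd)
      | some c => rfl
    have hany : (((List.lookup food_item rDict).getD []).any fun sd =>
        sd.all fun sd' => pvObt aDict rDict ignoreSet rDict.length sd'.1) = true :=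
      List.any_eq_true.mpr ⟨w, hw, hall⟩
    rw [hobt] at hany
    cases hany
  have hrsome : ¬ (List.lookup food_item rDict).isNone = true := by
    intro h
    cases hl : List.lookup food_item rDict with
    | some v => rw [hl] at h; cases h
    | none => rw [hl] at hwne; exact hwne rfl
  have hcond : ¬ (food_item ∈ ignoreSet ∨ (List.lookup food_item aDict).isNone = true ∧ (List.lookup food_item rDict).isNone = true) := by
    rintro (h1 | ⟨_, h2⟩)
    · exact hig h1
    · exact hrsome h2
  have hA : recursive_lowest_cost_helper food_item aDict rDict ignoreSet = (none, some []) := by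
    rw [recursive_lowest_cost_helper, pvRlchA, if_neg hcond]
    simp only [ha]
    exact pv_outer_all_fail _ _ hfail hwne none
  refine ⟨hA, ?_⟩
  have hrel := pv_rel aDict rDict ignoreSet (rDict.length + 1) food_item
  rw [recursive_lowest_cost_helper_alt]
  cases hw : pvLkB aDict ignoreSet (pvTblB aDict rDict ignoreSet (rDict.length + 1)) food_item with
  | some cg =>
    simp only [pvRelV, hw] at hrel
    rw [show pvRlchA aDict rDict ignoreSet (rDict.length + 1) food_item =
      recursive_lowest_cost_helper food_item aDict rDict ignoreSet from rfl, hA] at hrel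
    cases hrel
  | none => rfl

-- ===== VERDICT (by name: the statement is the Claim_ definition above) =====
theorem recursive_lowest_cost_helper_spec : Claim_unchanged_recursive_lowest_cost_helper := by
  intro food_item aDict rDict ignoreSet _hDom _hPre hnD
  have hrel := pv_rel aDict rDict ignoreSet (rDict.length + 1) food_item
  rw [recursive_lowest_cost_helper, recursive_lowest_cost_helper_alt]
  cases hw : pvLkB aDict ignoreSet (pvTblB aDict rDict ignoreSet (rDict.length + 1)) food_item with
  | some cg =>
    obtain ⟨c, g⟩ := cg
    simp only [pvRelV, hw] at hrel
    exact hrel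
  | none =>
    simp only [pvRelV, hw] at hrel
    show pvRlchA aDict rDict ignoreSet (rDict.length + 1) food_item = (none, none)
    -- A's cost is none; show A's grocery component is none too, or D_ would hold
    rw [pvRlchA] at hrel ⊢
    by_cases hig : food_item ∈ ignoreSet
    · rw [if_pos (Or.inl hig)]
    · cases ha : List.lookup food_item aDict with
      | some c =>
        have hcond : ¬ (food_item ∈ ignoreSet ∨ (List.lookup food_item aDict).isNone = true ∧ (List.lookup food_item rDict).isNone = true) := by
          rintro (h1 | ⟨h2, _⟩)
          · exact hig h1
          · simp [ha] at h2
        rw [if_neg hcond] at hrel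
        simp only [ha] at hrel
        cases hrel
      | none =>
        cases hr : List.lookup food_item rDict with
        | none =>
          rw [if_pos (show food_item ∈ ignoreSet ∨ (none : Option Int).isNone = true ∧
            (none : Option (List (List (String × Int)))).isNone = true from Or.inr ⟨rfl, rfl⟩)]
        | some ways =>
          have hcondG : ¬ (food_item ∈ ignoreSet ∨ (none : Option Int).isNone = true ∧
              (some ways).isNone = true) := by simp [hig]
          have hcondH : ¬ (food_item ∈ ignoreSet ∨ (List.lookup food_item aDict).isNone = true ∧
              (List.lookup food_item rDict).isNone = true) := by
            rintro (h1 | ⟨_, h2⟩)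
            · exact hig h1
            · simp [hr] at h2
          rw [if_neg hcondG]
          rw [if_neg hcondH] at hrel
          simp only [ha, hr, Option.getD_some] at hrel
          show pvOuterA (pvRlchA aDict rDict ignoreSet rDict.length) ((some ways).getD []) none none = (none, none)
          rw [Option.getD_some]
          by_cases hwe : ways = []
          · subst hwe; simp [pvOuterA]
          · exfalso
            apply hnD
            refine ⟨hig, ha, by rw [hr]; simpa using hwe, ?_⟩
            rw [← pv_obt_eq aDict rDict ignoreSet (rDict.length + 1) food_item]
            rw [pvRlchA, if_neg hcondH]
            simp only [ha, hr, Option.getD_some]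
            rw [hrel]
            rfl

theorem recursive_lowest_cost_helper_changed : Claim_changed_recursive_lowest_cost_helper := by
  unfold Claim_changed_recursive_lowest_cost_helper; decide

theorem recursive_lowest_cost_helper_tight : Claim_exact_recursive_lowest_cost_helper := by
  intro food_item aDict rDict ignoreSet _hDom _hPre hD
  obtain ⟨hA, hB⟩ := pv_values_in_D food_item aDict rDict ignoreSet hD
  rw [hA, hB]
  simp
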